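-- pv_equiv track=rewrite | github.com/SelianU/codetree-TILs | 250323/3개의 선 2/three-lines-2.py | choose_3_and_delete_column
-- ===== SOURCE A (Python) =====
-- def choose_3_and_delete_column(p_x, points):
--     for i_idx, first in enumerate(p_x):
--         for j_idx, second in enumerate(p_x):
--             for k_idx, third in enumerate(p_x):
--                 # p에 있는 거 제외하고 남은거 묶어서 리스트로 만들어
--                 p = [point for point in points if point[0] != first and point[0] != second and point[0] != third]
--                 if not p:
--                     continue
--                 else:
--                     return True
--     return False
-- ===== SOURCE B (Python) =====
-- def choose_3_and_delete_column(p_x, points):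
--     # A triple can avoid a point iff p_x has some value != the point's x
--     # (pick all three lines there), or trivially if p_x has two distinct values.
--     if not p_x:
--         return False
--     x0 = p_x[0]
--     if any(v != x0 for v in p_x):
--         return bool(points)
--     return any(pt[0] != x0 for pt in points)
-- ===== Notes on version B (the rewrite author's own statement) =====
-- stated objective: faster
-- what changed: Replaces the O(n^3) scan over all triples (each filtering all points) by a case analysis: a point survives some triple iff p_x contains a value different from its x, so B checks in one pass whether p_x has two distinct values and otherwise scans points once.
import Mathlib
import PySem

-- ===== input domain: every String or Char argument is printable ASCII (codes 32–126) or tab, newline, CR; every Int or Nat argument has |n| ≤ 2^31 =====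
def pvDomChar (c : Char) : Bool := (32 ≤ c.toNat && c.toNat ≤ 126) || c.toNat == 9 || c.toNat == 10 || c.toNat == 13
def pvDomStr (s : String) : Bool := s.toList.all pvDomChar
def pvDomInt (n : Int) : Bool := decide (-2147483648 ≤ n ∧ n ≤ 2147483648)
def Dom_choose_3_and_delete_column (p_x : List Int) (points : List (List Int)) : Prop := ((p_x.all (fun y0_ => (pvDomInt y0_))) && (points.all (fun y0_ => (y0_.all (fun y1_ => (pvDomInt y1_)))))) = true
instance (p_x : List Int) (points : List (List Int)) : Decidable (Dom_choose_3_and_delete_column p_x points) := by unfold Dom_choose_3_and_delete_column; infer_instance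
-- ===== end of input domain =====

-- B replaces A's triple-nested scan over p_x by a one-pass case analysis (asymptotically faster).

-- ===== PORT A =====
-- point[0] is ported as List.headD 0; under Pre_ every scanned point is nonempty, so it is exact there.
def choose_3_and_delete_column (p_x : List Int) (points : List (List Int)) : Bool :=
  p_x.any (fun first =>
    p_x.any (fun second =>
      p_x.any (fun third =>
        !(points.filter (fun pt =>
            pt.headD 0 != first && pt.headD 0 != second && pt.headD 0 != third)).isEmpty)))

-- ===== PORT B =====
def choose_3_and_delete_column_alt (p_x : List Int) (points : List (List Int)) : Bool :=
  match p_x with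
  | [] => false
  | x0 :: _ =>
    if p_x.any (fun v => v != x0) then !points.isEmpty
    else points.any (fun pt => pt.headD 0 != x0)

-- ===== PRECONDITION & SPEC =====
-- Pre_ excludes exactly the inputs where Python A raises IndexError: a nonempty p_x together with an empty point.
def Pre_choose_3_and_delete_column (p_x : List Int) (points : List (List Int)) : Prop :=
  p_x = [] ∨ ∀ pt ∈ points, pt ≠ []
instance (p_x : List Int) (points : List (List Int)) : Decidable (Pre_choose_3_and_delete_column p_x points) := by unfold Pre_choose_3_and_delete_column; infer_instance
def pvWitness_choose_3_and_delete_column : List Int × List (List Int) := ([1, 2], [[3, 4], [1, 0]])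

def Spec_choose_3_and_delete_column (p_x : List Int) (points : List (List Int)) (out : Bool) : Prop := out = choose_3_and_delete_column_alt p_x points
instance (p_x : List Int) (points : List (List Int)) (out : Bool) : Decidable (Spec_choose_3_and_delete_column p_x points out) := by unfold Spec_choose_3_and_delete_column; infer_instance

-- ===== CLAIM (what is proved, stated in full; the proofs are below) =====
def Claim_equal_choose_3_and_delete_column : Prop := ∀ (p_x : List Int) (points : List (List Int)), Dom_choose_3_and_delete_column p_x points → Pre_choose_3_and_delete_column p_x points → Spec_choose_3_and_delete_column p_x points (choose_3_and_delete_column p_x points)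

-- ===== LEMMAS AND PROOFS =====

-- A returns true iff some triple of p_x-values misses some point's x.
theorem portA_iff (p_x : List Int) (points : List (List Int)) :
    choose_3_and_delete_column p_x points = true ↔
      ∃ f ∈ p_x, ∃ s ∈ p_x, ∃ t ∈ p_x, ∃ pt ∈ points,
        pt.headD 0 ≠ f ∧ pt.headD 0 ≠ s ∧ pt.headD 0 ≠ t := by
  simp only [choose_3_and_delete_column, List.headD_eq_head?_getD, List.any_eq_true,
    Bool.not_eq_eq_eq_not, Bool.not_true, List.isEmpty_eq_false_iff, ne_eq,
    List.filter_eq_nil_iff, Bool.and_eq_true, bne_iff_ne, not_and, Decidable.not_not,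
    and_imp, not_forall]
  constructor
  · rintro ⟨f, hf, s, hs, t, ht, pt, hpt, h1, h2, h3⟩
    exact ⟨f, hf, s, hs, t, ht, pt, hpt, h1, h2, h3⟩
  · rintro ⟨f, hf, s, hs, t, ht, pt, hpt, h1, h2, h3⟩
    exact ⟨f, hf, s, hs, t, ht, pt, hpt, h1, h2, h3⟩

-- ===== VERDICT (by name: the statement is the Claim_ definition above) =====
theorem choose_3_and_delete_column_spec : Claim_equal_choose_3_and_delete_column := by
  intro p_x points _ _
  unfold Spec_choose_3_and_delete_column
  match p_x with
  | [] => simp [choose_3_and_delete_column, choose_3_and_delete_column_alt]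
  | x0 :: rest =>
    have hA := portA_iff (x0 :: rest) points
    by_cases hdist : ∃ v ∈ x0 :: rest, v ≠ x0
    · obtain ⟨v, hv, hvne⟩ := hdist
      have hB : choose_3_and_delete_column_alt (x0 :: rest) points = !points.isEmpty := by
        simp only [choose_3_and_delete_column_alt]
        rw [if_pos]
        simp only [List.any_eq_true, bne_iff_ne, ne_eq]
        exact ⟨v, hv, hvne⟩
      rw [hB]
      match points with
      | [] =>
        simp only [List.isEmpty_nil, Bool.not_true]
        rw [Bool.eq_false_iff]
        intro hT
        obtain ⟨_, _, _, _, _, _, pt, hpt, _⟩ := hA.mp hT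
        exact absurd hpt (List.not_mem_nil)
      | pt :: ps =>
        simp only [List.isEmpty_cons, Bool.not_false]
        apply hA.mpr
        by_cases h0 : pt.headD 0 = x0
        · exact ⟨v, hv, v, hv, v, hv, pt, List.mem_cons_self,
            fun h => hvne (h.symm.trans h0), fun h => hvne (h.symm.trans h0),
            fun h => hvne (h.symm.trans h0)⟩
        · exact ⟨x0, List.mem_cons_self, x0, List.mem_cons_self, x0, List.mem_cons_self,
            pt, List.mem_cons_self, h0, h0, h0⟩
    · have hall : ∀ v ∈ x0 :: rest, v = x0 := by
        intro v hv
        by_contra hne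
        exact hdist ⟨v, hv, hne⟩
      have hB : choose_3_and_delete_column_alt (x0 :: rest) points
          = points.any (fun pt => pt.headD 0 != x0) := by
        simp only [choose_3_and_delete_column_alt]
        rw [if_neg (by
          simp only [List.any_eq_true, bne_iff_ne, ne_eq, not_exists, not_and, not_not]
          exact hall)]
      rw [hB]
      by_cases hex : ∃ pt ∈ points, pt.headD 0 ≠ x0
      · obtain ⟨pt, hpt, hne⟩ := hex
        rw [hA.mpr ⟨x0, List.mem_cons_self, x0, List.mem_cons_self, x0, List.mem_cons_self,
          pt, hpt, hne, hne, hne⟩]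
        symm
        simp only [List.any_eq_true, bne_iff_ne, ne_eq]
        exact ⟨pt, hpt, hne⟩
      · have hAf : choose_3_and_delete_column (x0 :: rest) points = false := by
          rw [Bool.eq_false_iff]
          intro hT
          obtain ⟨f, hf, _, _, _, _, pt, hpt, h1, _, _⟩ := hA.mp hT
          exact hex ⟨pt, hpt, fun h => h1 (h.trans (hall f hf).symm)⟩
        rw [hAf]
        symm
        rw [List.any_eq_false]
        intro pt hpt
        simp only [bne_iff_ne, ne_eq, not_not]
        by_contra hne
        exact hex ⟨pt, hpt, hne⟩
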